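-- pv_equiv track=rewrite | github.com/Mike4lpha/PathPlanning | A*_algo.py | get_corner_points
-- ===== SOURCE A (Python) =====
-- def get_corner_points(path):
--     corners = [path[0]]
--     for i in range(1, len(path) - 1):
--         prev = path[i - 1]
--         curr = path[i]
--         next_ = path[i + 1]
--         if (curr[0] - prev[0], curr[1] - prev[1]) != (next_[0] - curr[0], next_[1] - curr[1]):
--             corners.append(curr)
--     corners.append(path[-1])
--     return corners
-- ===== SOURCE B (Python) =====
-- def get_corner_points(path):
--     corners = [path[0]]
--     n = len(path)
--     i = 0
--     while i < n - 1:
--         d = (path[i + 1][0] - path[i][0], path[i + 1][1] - path[i][1])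
--         j = i + 1
--         while j < n - 1 and (path[j + 1][0] - path[j][0], path[j + 1][1] - path[j][1]) == d:
--             j += 1
--         if j < n - 1:
--             corners.append(path[j])
--         i = j
--     corners.append(path[-1])
--     return corners
-- ===== Notes on version B (the rewrite author's own statement) =====
-- stated objective: alternative
-- what changed: Replaces A's per-index scan that tests every interior point against both neighbouring differences with a two-pointer run-length traversal: the outer loop jumps from straight run to straight run, an inner scan skips to the end of each run of equal deltas, and exactly one corner is appended per run boundary.
import Mathlib
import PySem

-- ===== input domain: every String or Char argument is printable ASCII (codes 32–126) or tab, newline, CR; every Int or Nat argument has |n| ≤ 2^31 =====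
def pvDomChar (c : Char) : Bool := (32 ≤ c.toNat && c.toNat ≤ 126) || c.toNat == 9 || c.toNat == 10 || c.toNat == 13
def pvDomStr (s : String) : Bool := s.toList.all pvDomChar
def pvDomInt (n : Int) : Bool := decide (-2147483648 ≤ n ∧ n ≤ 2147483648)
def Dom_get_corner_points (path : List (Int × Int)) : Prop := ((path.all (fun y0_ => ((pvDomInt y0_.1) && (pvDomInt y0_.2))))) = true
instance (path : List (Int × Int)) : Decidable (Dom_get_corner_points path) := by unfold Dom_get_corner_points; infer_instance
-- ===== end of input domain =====

-- B replaces A's per-index test of every interior point with a two-pointer run-length traversal: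
-- an inner scan skips to the end of each run of equal deltas and one corner is appended per run
-- boundary; same O(n), objective: alternative (different loop structure, not faster).

-- ===== PORT A =====
def get_corner_points (path : List (Int × Int)) : List (Int × Int) :=
  let corners : List (Int × Int) := [PySem.List.pyGetD path 0 (0, 0)]
  let corners := (PySem.List.pyRange 1 (PySem.List.len path - 1) 1).foldl
    (fun cs i =>
      let prev := PySem.List.pyGetD path (i - 1) (0, 0)
      let curr := PySem.List.pyGetD path i (0, 0)
      let next_ := PySem.List.pyGetD path (i + 1) (0, 0)
      if (curr.1 - prev.1, curr.2 - prev.2) ≠ (next_.1 - curr.1, next_.2 - curr.2)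
      then cs ++ [curr] else cs) corners
  corners ++ [PySem.List.pyGetD path (-1) (0, 0)]

-- ===== PORT B =====
-- inner while loop of Source B: advance j to the end of the current run of delta d
def pvScan (path : List (Int × Int)) (n : Int) (d : Int × Int) (j : Int) : Int :=
  if _h : j < n - 1 ∧ ((PySem.List.pyGetD path (j + 1) (0, 0)).1 - (PySem.List.pyGetD path j (0, 0)).1,
       (PySem.List.pyGetD path (j + 1) (0, 0)).2 - (PySem.List.pyGetD path j (0, 0)).2) = d
  then pvScan path n d (j + 1) else j
termination_by (n - 1 - j).toNat
decreasing_by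
  exact (Int.toNat_lt_toNat (Int.sub_pos.mpr _h.1)).mpr
    (sub_lt_sub_left (lt_add_one j) (n - 1))

-- the inner loop only moves j forward (needed for termination of the outer loop)
lemma pvScan_ge (path : List (Int × Int)) (n : Int) (d : Int × Int) (j : Int) :
    j ≤ pvScan path n d j := by
  induction j using pvScan.induct path n d with
  | case1 j h ih => rw [pvScan, dif_pos h]; omega
  | case2 j h => rw [pvScan, dif_neg h]

-- outer while loop of Source B
def pvOuter (path : List (Int × Int)) (n : Int) (i : Int) (corners : List (Int × Int)) :
    List (Int × Int) :=
  if _h : i < n - 1 then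
    let d := ((PySem.List.pyGetD path (i + 1) (0, 0)).1 - (PySem.List.pyGetD path i (0, 0)).1,
              (PySem.List.pyGetD path (i + 1) (0, 0)).2 - (PySem.List.pyGetD path i (0, 0)).2)
    let j := pvScan path n d (i + 1)
    pvOuter path n j
      (if j < n - 1 then corners ++ [PySem.List.pyGetD path j (0, 0)] else corners)
  else corners
termination_by (n - 1 - i).toNat
decreasing_by
  exact (Int.toNat_lt_toNat (Int.sub_pos.mpr _h)).mpr
    (sub_lt_sub_left
      (lt_of_lt_of_le (lt_add_one i)
        (pvScan_ge path n
          ((PySem.List.pyGetD path (i + 1) (0, 0)).1 - (PySem.List.pyGetD path i (0, 0)).1,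
           (PySem.List.pyGetD path (i + 1) (0, 0)).2 - (PySem.List.pyGetD path i (0, 0)).2)
          (i + 1)))
      (n - 1))

def get_corner_points_alt (path : List (Int × Int)) : List (Int × Int) :=
  let corners : List (Int × Int) := [PySem.List.pyGetD path 0 (0, 0)]
  let n := PySem.List.len path
  let corners := pvOuter path n 0 corners
  corners ++ [PySem.List.pyGetD path (-1) (0, 0)]

-- ===== PRECONDITION & SPEC =====
-- Pre_ excludes only the empty path, on which Python A raises IndexError at path[0].
def Pre_get_corner_points (path : List (Int × Int)) : Prop := path ≠ []
instance (path : List (Int × Int)) : Decidable (Pre_get_corner_points path) := by unfold Pre_get_corner_points; infer_instance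
def pvWitness_get_corner_points : (List (Int × Int)) := [(0, 0), (1, 0), (2, 1)]

def Spec_get_corner_points (path : List (Int × Int)) (out : List (Int × Int)) : Prop := out = get_corner_points_alt path
instance (path : List (Int × Int)) (out : List (Int × Int)) : Decidable (Spec_get_corner_points path out) := by unfold Spec_get_corner_points; infer_instance

-- ===== CLAIM (what is proved, stated in full; the proofs are below) =====
def Claim_equal_get_corner_points : Prop := ∀ (path : List (Int × Int)), Dom_get_corner_points path → Pre_get_corner_points path → Spec_get_corner_points path (get_corner_points path)

-- ===== LEMMAS AND PROOFS =====

-- the element A reads at index i, and A's direction-change test at index i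
def pvF (path : List (Int × Int)) (i : Int) : Int × Int := PySem.List.pyGetD path i (0, 0)

abbrev pvP (path : List (Int × Int)) (i : Int) : Prop :=
  ((pvF path i).1 - (pvF path (i - 1)).1, (pvF path i).2 - (pvF path (i - 1)).2) ≠
  ((pvF path (i + 1)).1 - (pvF path i).1, (pvF path (i + 1)).2 - (pvF path i).2)

-- the common middle section: interior points where the direction changes
def pvMid : List (Int × Int) → List (Int × Int)
  | a :: b :: c :: t =>
      (if (b.1 - a.1, b.2 - a.2) ≠ (c.1 - b.1, c.2 - b.2) then [b] else []) ++ pvMid (b :: c :: t)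
  | _ => []

lemma pvF_cons (x : Int × Int) (xs : List (Int × Int)) (i : Int) (h : 0 ≤ i) :
    pvF (x :: xs) (i + 1) = pvF xs i := by
  lift i to Nat using h
  unfold pvF
  rw [show ((i : Int) + 1) = ((i + 1 : Nat) : Int) by push_cast; ring,
      PySem.List.pyGetD_natCast, PySem.List.pyGetD_natCast, List.getD_cons_succ]

lemma pvP_cons (x : Int × Int) (xs : List (Int × Int)) (i : Int) (h : 1 ≤ i) :
    pvP (x :: xs) (i + 1) ↔ pvP xs i := by
  have e0 : pvF (x :: xs) (i + 1 - 1) = pvF xs (i - 1) := by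
    rw [show i + 1 - 1 = (i - 1) + 1 by ring]; exact pvF_cons _ _ _ (by omega)
  have e1 : pvF (x :: xs) (i + 1) = pvF xs i := pvF_cons _ _ _ (by omega)
  have e2 : pvF (x :: xs) (i + 1 + 1) = pvF xs (i + 1) := pvF_cons _ _ _ (by omega)
  unfold pvP
  rw [e0, e1, e2]

-- A's middle section equals pvMid
lemma pvA_mid (path : List (Int × Int)) :
    ((PySem.List.pyRange 1 (PySem.List.len path - 1) 1).filter
        (fun i => decide (pvP path i))).map (pvF path) = pvMid path := by
  induction path using pvMid.induct with
  | case1 a b c t ih =>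
      have hlen : PySem.List.len (a :: b :: c :: t) - 1 = ((t.length : Int) + 2) := by
        simp [PySem.List.len_eq]; try ring
      rw [hlen, PySem.List.pyRange_one_cons (by omega)]
      have hp : pvP (a :: b :: c :: t) 1 ↔ (b.1 - a.1, b.2 - a.2) ≠ (c.1 - b.1, c.2 - b.2) := by
        unfold pvP pvF
        norm_num [PySem.List.pyGetD_ofNat']
      have hf : pvF (a :: b :: c :: t) 1 = b := by
        unfold pvF; rw [PySem.List.pyGetD_ofNat']; rfl
      have hrange : PySem.List.pyRange (1 + 1) ((t.length : Int) + 2)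
          = (PySem.List.pyRange 1 (PySem.List.len (b :: c :: t) - 1) 1).map (fun i => i + 1) := by
        have hl : PySem.List.len (b :: c :: t) - 1 = ((t.length : Int) + 1) := by
          simp [PySem.List.len_eq]; try ring
        rw [hl, PySem.List.pyRange_one, PySem.List.pyRange_one, List.map_map,
            show ((t.length : Int) + 2 - (1 + 1)).toNat = t.length by omega,
            show ((t.length : Int) + 1 - 1).toNat = t.length by omega]
        apply List.map_congr_left
        intro k _
        simp only [Function.comp_apply]
        ring
      rw [hrange, List.filter_cons]
      have hfil : (PySem.List.pyRange 1 (PySem.List.len (b :: c :: t) - 1) 1).filter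
            ((fun i => decide (pvP (a :: b :: c :: t) i)) ∘ (fun i => i + 1))
          = (PySem.List.pyRange 1 (PySem.List.len (b :: c :: t) - 1) 1).filter
            (fun i => decide (pvP (b :: c :: t) i)) := by
        apply List.filter_congr
        intro i hi
        have h1 : 1 ≤ i := ((PySem.List.mem_pyRange_one).mp hi).1
        simp only [Function.comp_apply]
        exact decide_eq_decide.mpr (pvP_cons a (b :: c :: t) i h1)
      have hmap : ((PySem.List.pyRange 1 (PySem.List.len (b :: c :: t) - 1) 1).filter
            (fun i => decide (pvP (b :: c :: t) i))).map ((pvF (a :: b :: c :: t)) ∘ (fun i => i + 1))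
          = ((PySem.List.pyRange 1 (PySem.List.len (b :: c :: t) - 1) 1).filter
            (fun i => decide (pvP (b :: c :: t) i))).map (pvF (b :: c :: t)) := by
        apply List.map_congr_left
        intro i hi
        have h1 : 1 ≤ i := ((PySem.List.mem_pyRange_one).mp (List.mem_of_mem_filter hi)).1
        simp only [Function.comp_apply]
        exact pvF_cons a (b :: c :: t) i (by omega)
      by_cases hc : (b.1 - a.1, b.2 - a.2) ≠ (c.1 - b.1, c.2 - b.2)
      · rw [if_pos (by simp [hp, hc]), List.map_cons, hf,
            List.filter_map, List.map_map, hfil, hmap, ih]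
        simp [pvMid, hc]
      · rw [if_neg (by simp [hp, hc]),
            List.filter_map, List.map_map, hfil, hmap, ih]
        simp [pvMid, hc]
  | case2 p h =>
      have hle : PySem.List.len p - 1 ≤ 1 := by
        cases p with
        | nil => simp [PySem.List.len_eq]
        | cons x q =>
          cases q with
          | nil => simp [PySem.List.len_eq]
          | cons y r =>
            cases r with
            | nil => simp [PySem.List.len_eq]
            | cons z s => exact absurd rfl (h x y z s)
      rw [PySem.List.pyRange_one_eq_nil hle]
      cases p with
      | nil => rfl
      | cons x q =>
        cases q with
        | nil => rfl
        | cons y r =>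
          cases r with
          | nil => rfl
          | cons z s => exact absurd rfl (h x y z s)

-- pvMid of a list with fewer than three points is empty
lemma pvMid_short (l : List (Int × Int)) (h : l.length ≤ 2) : pvMid l = [] := by
  match l, h with
  | [], _ => rfl
  | [a], _ => rfl
  | [a, b], _ => rfl

-- pvF at an in-range nonnegative index is getElem
lemma pvF_eq_getElem (path : List (Int × Int)) (k : Int) (h0 : 0 ≤ k)
    (hk : k < (path.length : Int)) : pvF path k = path[k.toNat]'(by omega) := by
  lift k to Nat using h0
  unfold pvF
  rw [PySem.List.pyGetD_natCast]
  simp only [Int.toNat_natCast]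
  exact List.getD_eq_getElem path (0, 0) (by exact_mod_cast hk)

-- the inner scan never runs past the last index
lemma pvScan_le (path : List (Int × Int)) (n : Int) (d : Int × Int) (j : Int) :
    j ≤ n - 1 → pvScan path n d j ≤ n - 1 := by
  induction j using pvScan.induct path n d with
  | case1 j hc ih => intro _; rw [pvScan, dif_pos hc]; exact ih (by omega)
  | case2 j hc => intro h; rw [pvScan, dif_neg hc]; exact h

-- one step of pvMid at an interior index, phrased through A's accessors
lemma pvMid_step (path : List (Int × Int)) (j : Int)
    (h1 : 1 ≤ j) (h2 : j < (path.length : Int) - 1) :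
    pvMid (path.drop (j - 1).toNat)
      = (if pvP path j then [pvF path j] else []) ++ pvMid (path.drop j.toNat) := by
  have hdrop : path.drop (j - 1).toNat
      = path[(j - 1).toNat]'(by omega) :: path.drop ((j - 1).toNat + 1) :=
    List.drop_eq_getElem_cons (by omega)
  have hdrop2 : path.drop j.toNat
      = path[j.toNat]'(by omega) :: path.drop (j.toNat + 1) :=
    List.drop_eq_getElem_cons (by omega)
  have hdrop3 : path.drop ((j + 1).toNat)
      = path[(j + 1).toNat]'(by omega) :: path.drop ((j + 1).toNat + 1) :=
    List.drop_eq_getElem_cons (by omega)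
  have e1 : ((j : Int) - 1).toNat + 1 = j.toNat := by omega
  have e2 : j.toNat + 1 = ((j : Int) + 1).toNat := by omega
  have ga : pvF path (j - 1) = path[(j - 1).toNat]'(by omega) :=
    pvF_eq_getElem path (j - 1) (by omega) (by omega)
  have gb : pvF path j = path[j.toNat]'(by omega) :=
    pvF_eq_getElem path j (by omega) (by omega)
  have gc : pvF path (j + 1) = path[(j + 1).toNat]'(by omega) :=
    pvF_eq_getElem path (j + 1) (by omega) (by omega)
  rw [hdrop, e1, hdrop2, e2, hdrop3]
  have hpv : pvP path j ↔
      ((path[j.toNat]'(by omega)).1 - (path[(j - 1).toNat]'(by omega)).1,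
       (path[j.toNat]'(by omega)).2 - (path[(j - 1).toNat]'(by omega)).2) ≠
      ((path[(j + 1).toNat]'(by omega)).1 - (path[j.toNat]'(by omega)).1,
       (path[(j + 1).toNat]'(by omega)).2 - (path[j.toNat]'(by omega)).2) := by
    unfold pvP
    rw [ga, gb, gc]
  rw [show pvMid (path[(j - 1).toNat]'(by omega) :: path[j.toNat]'(by omega) ::
        path[(j + 1).toNat]'(by omega) :: path.drop ((j + 1).toNat + 1))
      = (if ((path[j.toNat]'(by omega)).1 - (path[(j - 1).toNat]'(by omega)).1,
             (path[j.toNat]'(by omega)).2 - (path[(j - 1).toNat]'(by omega)).2) ≠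
            ((path[(j + 1).toNat]'(by omega)).1 - (path[j.toNat]'(by omega)).1,
             (path[(j + 1).toNat]'(by omega)).2 - (path[j.toNat]'(by omega)).2)
         then [path[j.toNat]'(by omega)] else [])
        ++ pvMid (path[j.toNat]'(by omega) :: path[(j + 1).toNat]'(by omega) ::
            path.drop ((j + 1).toNat + 1)) from rfl]
  by_cases hc : pvP path j
  · rw [if_pos (hpv.mp hc), if_pos hc, gb]
  · rw [if_neg (fun w => hc (hpv.mpr w)), if_neg hc]

-- run lemma: the inner scan consumes a silent stretch of pvMid and emits the run boundary
lemma pvScan_mid (path : List (Int × Int)) (d : Int × Int) (j : Int) :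
    1 ≤ j → j ≤ (path.length : Int) - 1 →
    d = ((pvF path j).1 - (pvF path (j - 1)).1, (pvF path j).2 - (pvF path (j - 1)).2) →
    pvMid (path.drop (j - 1).toNat)
      = (if pvScan path (path.length : Int) d j < (path.length : Int) - 1
          then [pvF path (pvScan path (path.length : Int) d j)] else [])
        ++ pvMid (path.drop (pvScan path (path.length : Int) d j).toNat) := by
  induction j using pvScan.induct path (path.length : Int) d with
  | case1 j hc ih =>
      intro h1 _ hd
      rw [pvScan, dif_pos hc]
      have hnext : d = ((pvF path (j + 1)).1 - (pvF path (j + 1 - 1)).1,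
          (pvF path (j + 1)).2 - (pvF path (j + 1 - 1)).2) := by
        rw [show j + 1 - 1 = j by ring]
        unfold pvF
        exact hc.2.symm
      have hnp : ¬ pvP path j := by
        unfold pvP
        simp only [not_not]
        have l1 : ((pvF path j).1 - (pvF path (j - 1)).1,
            (pvF path j).2 - (pvF path (j - 1)).2) = d := hd.symm
        have l2 : ((pvF path (j + 1)).1 - (pvF path j).1,
            (pvF path (j + 1)).2 - (pvF path j).2) = d := by
          unfold pvF; exact hc.2
        rw [l1, l2]
      have hstep := pvMid_step path j h1 hc.1
      rw [hstep, if_neg hnp]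
      have ihr := ih (by omega) (by omega) hnext
      rw [show j + 1 - 1 = j by ring] at ihr
      exact ihr
  | case2 j hc =>
      intro h1 h2 hd
      rw [pvScan, dif_neg hc]
      by_cases hlt : j < (path.length : Int) - 1
      · have hp : pvP path j := by
          unfold pvP
          intro w
          apply hc
          refine ⟨hlt, ?_⟩
          have : ((pvF path (j + 1)).1 - (pvF path j).1,
              (pvF path (j + 1)).2 - (pvF path j).2) = d := by
            rw [← w, ← hd]
          exact this
        rw [pvMid_step path j h1 hlt, if_pos hp, if_pos hlt]
      · have hj : j = (path.length : Int) - 1 := by omega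
        rw [if_neg hlt]
        have hlen1 : (path.drop (j - 1).toNat).length ≤ 2 := by
          rw [List.length_drop]; omega
        have hlen2 : (path.drop j.toNat).length ≤ 2 := by
          rw [List.length_drop]; omega
        rw [pvMid_short _ hlen1, pvMid_short _ hlen2]
        rfl

-- outer loop produces the whole middle section
lemma pvOuter_mid (path : List (Int × Int)) (m : Nat) :
    ∀ (i : Int) (cs : List (Int × Int)), ((path.length : Int) - 1 - i).toNat ≤ m →
    0 ≤ i → i ≤ (path.length : Int) - 1 →
    pvOuter path (path.length : Int) i cs = cs ++ pvMid (path.drop i.toNat) := by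
  induction m with
  | zero =>
      intro i cs hm h0 h2
      have h : ¬ i < (path.length : Int) - 1 := by omega
      rw [pvOuter, dif_neg h]
      have hlen : (path.drop i.toNat).length ≤ 2 := by
        rw [List.length_drop]; omega
      rw [pvMid_short _ hlen, List.append_nil]
  | succ m ih =>
      intro i cs hm h0 h2
      by_cases h : i < (path.length : Int) - 1
      · rw [pvOuter, dif_pos h]
        show pvOuter path (path.length : Int)
            (pvScan path (path.length : Int)
              ((PySem.List.pyGetD path (i + 1) (0, 0)).1 - (PySem.List.pyGetD path i (0, 0)).1,
               (PySem.List.pyGetD path (i + 1) (0, 0)).2 - (PySem.List.pyGetD path i (0, 0)).2)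
              (i + 1))
            (if pvScan path (path.length : Int)
              ((PySem.List.pyGetD path (i + 1) (0, 0)).1 - (PySem.List.pyGetD path i (0, 0)).1,
               (PySem.List.pyGetD path (i + 1) (0, 0)).2 - (PySem.List.pyGetD path i (0, 0)).2)
              (i + 1) < (path.length : Int) - 1
             then cs ++ [PySem.List.pyGetD path (pvScan path (path.length : Int)
              ((PySem.List.pyGetD path (i + 1) (0, 0)).1 - (PySem.List.pyGetD path i (0, 0)).1,
               (PySem.List.pyGetD path (i + 1) (0, 0)).2 - (PySem.List.pyGetD path i (0, 0)).2)
              (i + 1)) (0, 0)] else cs)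
          = cs ++ pvMid (path.drop i.toNat)
        set d : Int × Int :=
          ((PySem.List.pyGetD path (i + 1) (0, 0)).1 - (PySem.List.pyGetD path i (0, 0)).1,
           (PySem.List.pyGetD path (i + 1) (0, 0)).2 - (PySem.List.pyGetD path i (0, 0)).2) with hd
        set j : Int := pvScan path (path.length : Int) d (i + 1) with hj
        have hge : i + 1 ≤ j := hj ▸ pvScan_ge path (path.length : Int) d (i + 1)
        have hle : j ≤ (path.length : Int) - 1 :=
          hj ▸ pvScan_le path (path.length : Int) d (i + 1) (by omega)
        have hdprev : d = ((pvF path (i + 1)).1 - (pvF path (i + 1 - 1)).1,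
            (pvF path (i + 1)).2 - (pvF path (i + 1 - 1)).2) := by
          rw [show i + 1 - 1 = i by ring]
          rw [hd]
          unfold pvF
          rfl
        have hrun := pvScan_mid path d (i + 1) (by omega) (by omega) hdprev
        rw [show i + 1 - 1 = i by ring] at hrun
        rw [← hj] at hrun
        have hrec := ih j (if j < (path.length : Int) - 1
            then cs ++ [PySem.List.pyGetD path j (0, 0)] else cs) (by omega) (by omega) hle
        rw [hrec, hrun]
        by_cases hlt : j < (path.length : Int) - 1
        · rw [if_pos hlt, if_pos hlt]
          show cs ++ [pvF path j] ++ pvMid (path.drop j.toNat)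
            = cs ++ ([pvF path j] ++ pvMid (path.drop j.toNat))
          rw [List.append_assoc]
        · rw [if_neg hlt, if_neg hlt, List.nil_append]
      · rw [pvOuter, dif_neg h]
        have hlen : (path.drop i.toNat).length ≤ 2 := by
          rw [List.length_drop]; omega
        rw [pvMid_short _ hlen, List.append_nil]

-- ===== VERDICT (by name: the statement is the Claim_ definition above) =====
theorem get_corner_points_spec : Claim_equal_get_corner_points := by
  intro path _ hpre
  show get_corner_points path = get_corner_points_alt path
  have key := PySem.List.foldl_append_ite (pvP path) (pvF path)
    (PySem.List.pyRange 1 (PySem.List.len path - 1) 1) [pvF path 0]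
  have hA : get_corner_points path
      = ([pvF path 0] ++ pvMid path) ++ [PySem.List.pyGetD path (-1) (0, 0)] := by
    calc get_corner_points path
        = (PySem.List.pyRange 1 (PySem.List.len path - 1) 1).foldl
            (fun cs i => if pvP path i then cs ++ [pvF path i] else cs) [pvF path 0]
            ++ [PySem.List.pyGetD path (-1) (0, 0)] := rfl
      _ = ([pvF path 0] ++ pvMid path) ++ [PySem.List.pyGetD path (-1) (0, 0)] := by
            rw [key, pvA_mid]
  have hlen : 1 ≤ (path.length : Int) := by
    cases path with
    | nil => exact absurd rfl hpre
    | cons x t => simp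
  have hn : PySem.List.len path = (path.length : Int) := PySem.List.len_eq path
  have hB : get_corner_points_alt path
      = [pvF path 0] ++ pvMid path ++ [PySem.List.pyGetD path (-1) (0, 0)] := by
    show pvOuter path (PySem.List.len path) 0 [PySem.List.pyGetD path 0 (0, 0)]
        ++ [PySem.List.pyGetD path (-1) (0, 0)]
      = [pvF path 0] ++ pvMid path ++ [PySem.List.pyGetD path (-1) (0, 0)]
    rw [hn, pvOuter_mid path ((path.length : Int) - 1 - 0).toNat 0
      [PySem.List.pyGetD path 0 (0, 0)] le_rfl le_rfl (by omega)]
    rfl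
  rw [hA, hB, List.append_assoc]
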